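-- pv_equiv track=rewrite | github.com/Vnntnn/IT-Clash | IT Clash/Online/5/Command Line cdls.py | slice_string
-- ===== SOURCE A (Python) =====
-- def slice_string(s, start, end=None):
--     """Slicing string without list method :<"""
--     result = ""
--     i = 0
--     it = iter(s)
--     while True:
--         try:
--             c = next(it)
--             if i >= start and (end is None or i < end):
--                 result += c
--             i += 1
--         except StopIteration:
--             break
--     return result
-- ===== SOURCE B (Python) =====
-- def slice_string(s, start, end=None):
--     """Slicing string without list method :<"""
--     lo = max(start, 0)
--     hi = len(s) if end is None else max(end, 0)
--     return s[lo:hi]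
-- ===== Notes on version B (the rewrite author's own statement) =====
-- stated objective: faster
-- what changed: Replaces A's character-by-character iterator scan with repeated string concatenation by computing the clamped bounds lo=max(start,0), hi=len(s) or max(end,0) and returning the single native slice s[lo:hi].
import Mathlib
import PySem

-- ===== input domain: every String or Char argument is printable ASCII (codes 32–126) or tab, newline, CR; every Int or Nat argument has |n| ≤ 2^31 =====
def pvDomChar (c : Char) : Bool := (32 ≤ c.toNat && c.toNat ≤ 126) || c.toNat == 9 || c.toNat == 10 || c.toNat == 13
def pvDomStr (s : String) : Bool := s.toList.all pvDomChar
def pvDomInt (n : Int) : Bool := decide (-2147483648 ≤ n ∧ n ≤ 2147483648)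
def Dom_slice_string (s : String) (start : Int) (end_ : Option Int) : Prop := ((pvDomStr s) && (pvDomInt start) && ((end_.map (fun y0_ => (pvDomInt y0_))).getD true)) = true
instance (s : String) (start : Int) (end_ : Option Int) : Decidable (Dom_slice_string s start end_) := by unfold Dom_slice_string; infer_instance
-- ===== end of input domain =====

-- B replaces A's character-by-character scan by a single slice with clamped bounds (simpler; no loop).

-- ===== PORT A =====
-- A's loop body: append c when i >= start and (end is None or i < end), then i += 1.
def sliceStep (start : Int) (end_ : Option Int) (acc : List Char × Int) (c : Char) : List Char × Int :=
  if decide (start ≤ acc.2) && end_.all (fun e => decide (acc.2 < e)) then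
    (acc.1 ++ [c], acc.2 + 1)
  else
    (acc.1, acc.2 + 1)

def slice_string (s : String) (start : Int) (end_ : Option Int) : String :=
  String.mk (s.toList.foldl (sliceStep start end_) ([], 0)).1

-- ===== PORT B =====
def slice_string_alt (s : String) (start : Int) (end_ : Option Int) : String :=
  let lo : Int := max start 0
  let hi : Int := match end_ with
    | none => (s.toList.length : Int)    -- len(s)
    | some e => max e 0
  String.mk (PySem.List.slice s.toList (some lo) (some hi))    -- s[lo:hi]

-- ===== PRECONDITION & SPEC =====
def Spec_slice_string (s : String) (start : Int) (end_ : Option Int) (out : String) : Prop := out = slice_string_alt s start end_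
instance (s : String) (start : Int) (end_ : Option Int) (out : String) : Decidable (Spec_slice_string s start end_ out) := by unfold Spec_slice_string; infer_instance

-- ===== CLAIM (what is proved, stated in full; the proofs are below) =====
def Claim_equal_slice_string : Prop := ∀ (s : String) (start : Int) (end_ : Option Int), Dom_slice_string s start end_ → Spec_slice_string s start end_ (slice_string s start end_)

-- ===== LEMMAS AND PROOFS =====

-- Bool condition of A's step, as a decidable Prop, per shape of end_.
lemma cond_some (start e i : Int) :
    (decide (start ≤ i) && Option.all (fun x => decide (i < x)) (some e)) = decide (start ≤ i ∧ i < e) := by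
  simp [Bool.decide_and]

lemma cond_none (start i : Int) :
    (decide (start ≤ i) && Option.all (fun x => decide (i < x)) none) = decide (start ≤ i) := by
  simp

-- A's fold with end = some e collects exactly the clamped slice.
lemma foldA_some (start e : Int) (l r : List Char) (j : Nat) :
    (l.foldl (sliceStep start (some e)) (r, (j : Int))).1
      = r ++ ((l.drop (start.toNat - j)).take (e.toNat - max j start.toNat)) := by
  induction l generalizing r j with
  | nil => simp
  | cons c t ih =>
    have hcast : ((j : Int) + 1) = ((j + 1 : Nat) : Int) := by push_cast; ring
    simp only [List.foldl_cons, sliceStep, cond_some, decide_eq_true_eq]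
    rw [hcast]
    by_cases h1 : start ≤ (j : Int)
    · by_cases h2 : (j : Int) < e
      · rw [if_pos ⟨h1, h2⟩, ih]
        have ha : start.toNat - j = 0 := by omega
        have hb : start.toNat - (j + 1) = 0 := by omega
        have hc : e.toNat - max j start.toNat = (e.toNat - max (j + 1) start.toNat) + 1 := by omega
        rw [ha, hb, hc]
        simp [List.take_succ_cons]
      · rw [if_neg (by tauto), ih]
        have ha : e.toNat - max j start.toNat = 0 := by omega
        have hb : e.toNat - max (j + 1) start.toNat = 0 := by omega
        rw [ha, hb]
        simp
    · rw [if_neg (by tauto), ih]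
      have ha : start.toNat - j = (start.toNat - (j + 1)) + 1 := by omega
      have hb : max j start.toNat = start.toNat := by omega
      have hc : max (j + 1) start.toNat = start.toNat := by omega
      rw [ha, hb, hc]
      simp [List.drop_succ_cons]

-- A's fold with end = None collects exactly the clamped tail.
lemma foldA_none (start : Int) (l r : List Char) (j : Nat) :
    (l.foldl (sliceStep start none) (r, (j : Int))).1
      = r ++ l.drop (start.toNat - j) := by
  induction l generalizing r j with
  | nil => simp
  | cons c t ih =>
    have hcast : ((j : Int) + 1) = ((j + 1 : Nat) : Int) := by push_cast; ring
    simp only [List.foldl_cons, sliceStep, cond_none, decide_eq_true_eq]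
    rw [hcast]
    by_cases h1 : start ≤ (j : Int)
    · rw [if_pos h1, ih]
      have ha : start.toNat - j = 0 := by omega
      have hb : start.toNat - (j + 1) = 0 := by omega
      rw [ha, hb]
      simp
    · rw [if_neg h1, ih]
      have ha : start.toNat - j = (start.toNat - (j + 1)) + 1 := by omega
      rw [ha]
      simp [List.drop_succ_cons]

-- ===== VERDICT (by name: the statement is the Claim_ definition above) =====
theorem slice_string_spec : Claim_equal_slice_string := by
  intro s start end_ _
  unfold Spec_slice_string slice_string slice_string_alt
  cases end_ with
  | none =>
    have h := foldA_none start s.toList [] 0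
    simp only [Nat.cast_zero, List.nil_append, Nat.sub_zero] at h
    show String.mk _ = String.mk (PySem.List.slice s.toList (some (max start 0)) (some (s.toList.length : Int)))
    rw [h, PySem.List.slice_toNat (ha := le_max_right _ _) (hb := Int.natCast_nonneg _)]
    have ha : (max start 0).toNat = start.toNat := by omega
    have hb : ((s.toList.length : Int)).toNat = s.toList.length := by omega
    rw [ha, hb]
    congr 1
    rw [List.take_of_length_le]
    simp
  | some e =>
    have h := foldA_some start e s.toList [] 0
    simp only [Nat.cast_zero, List.nil_append, Nat.sub_zero, Nat.zero_max] at h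
    show String.mk _ = String.mk (PySem.List.slice s.toList (some (max start 0)) (some (max e 0)))
    rw [h, PySem.List.slice_toNat (ha := le_max_right _ _) (hb := le_max_right _ _)]
    have ha : (max start 0).toNat = start.toNat := by omega
    have hb : (max e 0).toNat = e.toNat := by omega
    rw [ha, hb]
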